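-- pv_equiv track=rewrite | github.com/KianGentry/MUSINKSBOT | musinksbot/prompting.py | _last_non_bot_message
-- ===== SOURCE A (Python) =====
-- BOT_AUTHOR = "bot"
--
-- def _last_non_bot_message(messages: list[tuple[str, str]]) -> str:
--     for author, content in reversed(messages):
--         if author.strip().lower() == BOT_AUTHOR:
--             continue
--         c = (content or "").strip()
--         if c:
--             return c
--     return ""
-- ===== SOURCE B (Python) =====
-- BOT_AUTHOR = "bot"
--
-- def _last_non_bot_message(messages: list[tuple[str, str]]) -> str:
--     # Stage 1: collect the stripped contents of all qualifying messages, in order.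
--     candidates = [c
--                   for author, content in messages
--                   if author.strip().lower() != BOT_AUTHOR
--                   for c in [(content or "").strip()]
--                   if c]
--     # Stage 2: the answer is the last candidate (or "" if there is none).
--     return candidates[-1] if candidates else ""
-- ===== Notes on version B (the rewrite author's own statement) =====
-- stated objective: alternative
-- what changed: Two-stage decomposition: first build the full list of stripped non-bot non-empty contents (filter/map), then take its last element, instead of A's reversed scan with an early return.
import Mathlib
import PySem

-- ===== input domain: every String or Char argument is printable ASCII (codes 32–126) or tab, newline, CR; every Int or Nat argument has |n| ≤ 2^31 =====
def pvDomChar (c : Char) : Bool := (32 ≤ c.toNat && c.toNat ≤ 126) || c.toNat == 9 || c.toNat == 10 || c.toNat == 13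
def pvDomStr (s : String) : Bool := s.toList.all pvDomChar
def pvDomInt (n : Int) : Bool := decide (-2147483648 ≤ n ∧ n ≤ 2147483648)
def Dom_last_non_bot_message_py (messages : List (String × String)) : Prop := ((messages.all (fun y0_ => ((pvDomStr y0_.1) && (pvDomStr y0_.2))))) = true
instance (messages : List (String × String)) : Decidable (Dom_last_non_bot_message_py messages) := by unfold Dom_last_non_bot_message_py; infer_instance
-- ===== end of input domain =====

-- B replaces A's reversed scan with early return by two staged passes: collect the stripped
-- contents of all qualifying messages, then take the last element; same cost (alternative).

-- ===== PORT A =====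
-- the for-loop over reversed(messages) with its early return, as structural recursion
def lnbLoopA : List (String × String) → String
  | [] => ""
  | (author, content) :: rest =>
      if PySem.Str.lower (PySem.Str.strip author) = "bot" then lnbLoopA rest
      else
        let c := PySem.Str.strip (if content = "" then "" else content)  -- (content or "").strip()
        if c ≠ "" then c else lnbLoopA rest

def last_non_bot_message_py (messages : List (String × String)) : String :=
  lnbLoopA messages.reverse

-- ===== PORT B =====
-- stage 1: the candidate for one message (none if skipped), used by a filterMap
def lnbCandB (m : String × String) : Option String :=
  if PySem.Str.lower (PySem.Str.strip m.1) = "bot" then none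
  else
    let c := PySem.Str.strip (if m.2 = "" then "" else m.2)
    if c = "" then none else some c

-- stage 2: candidates[-1] if candidates else ""
def last_non_bot_message_py_alt (messages : List (String × String)) : String :=
  ((messages.filterMap lnbCandB).getLast?).getD ""

-- ===== PRECONDITION & SPEC =====
def Spec_last_non_bot_message_py (messages : List (String × String)) (out : String) : Prop := out = last_non_bot_message_py_alt messages
instance (messages : List (String × String)) (out : String) : Decidable (Spec_last_non_bot_message_py messages out) := by unfold Spec_last_non_bot_message_py; infer_instance

-- ===== CLAIM (what is proved, stated in full; the proofs are below) =====
def Claim_equal_last_non_bot_message_py : Prop := ∀ (messages : List (String × String)), Dom_last_non_bot_message_py messages → Spec_last_non_bot_message_py messages (last_non_bot_message_py messages)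

-- ===== LEMMAS AND PROOFS =====
-- A's loop over any list returns the head of the candidate list of that list
theorem lnbLoopA_eq_head (l : List (String × String)) :
    lnbLoopA l = ((l.filterMap lnbCandB).head?).getD "" := by
  induction l with
  | nil => rfl
  | cons m rest ih =>
      obtain ⟨a, c⟩ := m
      by_cases hb : PySem.Str.lower (PySem.Str.strip a) = "bot"
      · simp [lnbLoopA, lnbCandB, hb, ih]
      · by_cases hc : PySem.Str.strip (if c = "" then "" else c) = ""
        · simp [lnbLoopA, lnbCandB, hb, hc, ih]
        · simp [lnbLoopA, lnbCandB, hb, hc]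

-- ===== VERDICT (by name: the statement is the Claim_ definition above) =====
theorem last_non_bot_message_py_spec : Claim_equal_last_non_bot_message_py := by
  intro messages _
  unfold Spec_last_non_bot_message_py last_non_bot_message_py last_non_bot_message_py_alt
  rw [lnbLoopA_eq_head, List.filterMap_reverse, List.head?_reverse]
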